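-- pv_equiv track=rewrite | github.com/kathaler/AdventOfCode2022 | AoC8.py | check_mat
-- ===== SOURCE A (Python) =====
-- def is_max(v, l):
--     for i in l:
--         if i >= v:
--             return False
--     return True
--
-- def check_mat(m):
--     s = set()
--     row = 0
--     for l in m:
--         i = 0
--         j = len(l) - 1
--         while i < len(l) and j > 0:
--             if is_max(l[i], l[:i]):
--                 s.add(str(row) + ":" + str(i))
--             if is_max(l[j], l[j+1:]):
--                 s.add(str(row) + ":" + str(j))
--             i += 1
--             j -= 1
--         row += 1
--     return s
-- ===== SOURCE B (Python) =====
-- def check_mat(m):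
--     s = set()
--     for row, l in enumerate(m):
--         n = len(l)
--         # pm[i] = max of l[:i] (None if empty), one left-to-right pass
--         pm = []
--         best = None
--         for x in l:
--             pm.append(best)
--             if best is None or x > best:
--                 best = x
--         # sm[j] = max of l[j+1:] (None if empty), one right-to-left pass
--         sm = [None] * n
--         best = None
--         for j in range(n - 1, -1, -1):
--             sm[j] = best
--             if best is None or l[j] > best:
--                 best = l[j]
--         for k in range(n - 1):
--             j = n - 1 - k
--             if pm[k] is None or l[k] > pm[k]:
--                 s.add(str(row) + ":" + str(k))
--             if sm[j] is None or l[j] > sm[j]: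
--                 s.add(str(row) + ":" + str(j))
--     return s
-- ===== Notes on version B (the rewrite author's own statement) =====
-- stated objective: faster
-- what changed: Replaced the per-cell rescans of the whole prefix/suffix (is_max over a fresh slice for every index) by one running prefix-max pass and one running suffix-max pass per row, so each visibility test is a single O(1) comparison.
import Mathlib
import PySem

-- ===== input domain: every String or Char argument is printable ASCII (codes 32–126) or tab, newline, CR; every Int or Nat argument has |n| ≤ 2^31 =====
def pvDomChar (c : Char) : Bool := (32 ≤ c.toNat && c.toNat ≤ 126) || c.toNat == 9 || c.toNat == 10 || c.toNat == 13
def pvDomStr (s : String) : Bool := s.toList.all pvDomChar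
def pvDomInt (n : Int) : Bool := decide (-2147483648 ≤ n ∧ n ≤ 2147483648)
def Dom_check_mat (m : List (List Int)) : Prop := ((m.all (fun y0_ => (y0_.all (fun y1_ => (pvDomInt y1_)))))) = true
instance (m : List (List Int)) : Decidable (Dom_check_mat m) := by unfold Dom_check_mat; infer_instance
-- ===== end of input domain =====

-- B replaces A's per-cell rescan of the whole prefix/suffix with one running prefix-max
-- and one running suffix-max pass per row (objective: faster, asymptotically).

-- ===== PORT A =====
def is_max (v : Int) : List Int → Bool
  | [] => true
  | i :: rest => if i ≥ v then false else is_max v rest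

-- the while loop of A; l[i] / l[j] are always in range when read (i counts up from 0,
-- 0 < j ≤ len-1), so the '.getD 0' default is never used on reachable calls
def aInner (row : Int) (l : List Int) (i j : Int) (s : PySem.Set String) : PySem.Set String :=
  if h : i < (l.length : Int) ∧ 0 < j then
    let s1 := if is_max ((PySem.List.pyGet? l i).getD 0) (PySem.List.slice l none (some i)) then
        PySem.Set.add s (PySem.Int.toStr row ++ ":" ++ PySem.Int.toStr i) else s
    let s2 := if is_max ((PySem.List.pyGet? l j).getD 0) (PySem.List.slice l (some (j+1)) none) then
        PySem.Set.add s1 (PySem.Int.toStr row ++ ":" ++ PySem.Int.toStr j) else s1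
    aInner row l (i+1) (j-1) s2
  else s
termination_by ((l.length : Int) - i).toNat
decreasing_by omega

def check_mat (m : List (List Int)) : List String :=
  (m.foldl (fun (st : PySem.Set String × Int) l =>
      (aInner st.2 l 0 ((l.length : Int) - 1) st.1, st.2 + 1))
    (PySem.Set.empty, 0)).1

-- ===== PORT B =====
-- 'best = x if best is None or x > best else best'
def upd (b : Option Int) (x : Int) : Option Int :=
  match b with
  | none => some x
  | some m => if x > m then some x else some m

-- the pm list of Source B: pm[i] holds the running max of l[:i] (none for the empty prefix)
def bPref : List Int → Option Int → List (Option Int)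
  | [], _ => []
  | x :: xs, best => best :: bPref xs (upd best x)

-- the sm list of Source B, built right to left; .2 is the running best over the processed suffix
def bSuf : List Int → List (Option Int) × Option Int
  | [] => ([], none)
  | x :: xs =>
    let r := bSuf xs
    (r.2 :: r.1, upd r.2 x)

-- 'pm[i] is None or l[i] > pm[i]'
def bVis (v : Int) : Option Int → Bool
  | none => true
  | some b => decide (b < v)

def bRow (row : Int) (l : List Int) (s : PySem.Set String) : PySem.Set String :=
  let n : Int := l.length
  let pm := bPref l none
  let sm := (bSuf l).1
  (PySem.List.pyRange 0 (n - 1) 1).foldl (fun s k =>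
    let j := n - 1 - k
    let s1 := if bVis ((PySem.List.pyGet? l k).getD 0) ((PySem.List.pyGet? pm k).getD none) then
        PySem.Set.add s (PySem.Int.toStr row ++ ":" ++ PySem.Int.toStr k) else s
    if bVis ((PySem.List.pyGet? l j).getD 0) ((PySem.List.pyGet? sm j).getD none) then
        PySem.Set.add s1 (PySem.Int.toStr row ++ ":" ++ PySem.Int.toStr j) else s1) s

def check_mat_alt (m : List (List Int)) : List String :=
  (PySem.List.enumerate m 0).foldl (fun (s : PySem.Set String) p => bRow p.1 p.2 s)
    PySem.Set.empty

-- ===== PRECONDITION & SPEC =====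
def Spec_check_mat (m : List (List Int)) (out : List String) : Prop := out = check_mat_alt m
instance (m : List (List Int)) (out : List String) : Decidable (Spec_check_mat m out) := by unfold Spec_check_mat; infer_instance

-- ===== CLAIM (what is proved, stated in full; the proofs are below) =====
def Claim_equal_check_mat : Prop := ∀ (m : List (List Int)), Dom_check_mat m → Spec_check_mat m (check_mat m)

-- ===== LEMMAS AND PROOFS =====

lemma vis_upd (v x : Int) (b : Option Int) :
    bVis v (upd b x) = (bVis v b && decide (x < v)) := by
  cases b <;> simp [bVis, upd]
  split_ifs <;> simp <;> omega

lemma vis_foldl_upd (v : Int) (p : List Int) (b : Option Int) :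
    bVis v (p.foldl upd b) = (bVis v b && is_max v p) := by
  induction p generalizing b with
  | nil => simp [is_max]
  | cons x xs ih =>
    by_cases hx : x < v
    · simp [List.foldl_cons, ih, vis_upd, is_max, hx, not_le.mpr hx]
    · simp [List.foldl_cons, ih, vis_upd, is_max, hx, not_lt.mp hx]

lemma vis_suf_best (v : Int) (p : List Int) :
    bVis v (bSuf p).2 = is_max v p := by
  induction p with
  | nil => simp [bSuf, bVis, is_max]
  | cons x xs ih =>
    by_cases hx : x < v
    · simp [bSuf, vis_upd, ih, is_max, hx, not_le.mpr hx, Bool.and_comm]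
    · simp [bSuf, vis_upd, ih, is_max, hx, not_lt.mp hx]

lemma bPref_get (l : List Int) (b : Option Int) (k : Nat) (hk : k < l.length) :
    (bPref l b)[k]? = some ((l.take k).foldl upd b) := by
  induction l generalizing b k with
  | nil => simp at hk
  | cons x xs ih =>
    cases k with
    | zero => simp [bPref]
    | succ k => simpa [bPref] using ih (upd b x) k (by simpa using hk)

lemma bSuf_get (l : List Int) (k : Nat) (hk : k < l.length) :
    (bSuf l).1[k]? = some (bSuf (l.drop (k + 1))).2 := by
  induction l generalizing k with
  | nil => simp at hk
  | cons x xs ih =>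
    cases k with
    | zero => simp [bSuf]
    | succ k => simpa [bSuf] using ih k (by simpa using hk)

lemma condL (l : List Int) (i : Nat) (hi : i < l.length) :
    bVis ((PySem.List.pyGet? l (i : Int)).getD 0) ((PySem.List.pyGet? (bPref l none) (i : Int)).getD none)
      = is_max ((PySem.List.pyGet? l (i : Int)).getD 0) (PySem.List.slice l none (some (i : Int))) := by
  simp only [PySem.List.pyGet?_natCast, PySem.List.slice_to_natCast]
  rw [bPref_get l none i hi, Option.getD_some, vis_foldl_upd]
  simp [bVis]

lemma condR (l : List Int) (j : Nat) (hj : j < l.length) :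
    bVis ((PySem.List.pyGet? l (j : Int)).getD 0) ((PySem.List.pyGet? (bSuf l).1 (j : Int)).getD none)
      = is_max ((PySem.List.pyGet? l (j : Int)).getD 0) (PySem.List.slice l (some ((j : Int) + 1)) none) := by
  have h1 : ((j : Int) + 1) = ((j + 1 : Nat) : Int) := by push_cast; ring
  simp only [PySem.List.pyGet?_natCast]
  rw [h1, PySem.List.slice_from_natCast, bSuf_get l j hj, Option.getD_some, vis_suf_best]

lemma zig (row : Int) (l : List Int) :
    ∀ (d i : Nat) (s : PySem.Set String), l.length - 1 - i = d →
    aInner row l (i : Int) ((l.length : Int) - 1 - (i : Int)) s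
      = (PySem.List.pyRange (i : Int) ((l.length : Int) - 1) 1).foldl (fun s k =>
          let j := (l.length : Int) - 1 - k
          let s1 := if bVis ((PySem.List.pyGet? l k).getD 0) ((PySem.List.pyGet? (bPref l none) k).getD none) then
              PySem.Set.add s (PySem.Int.toStr row ++ ":" ++ PySem.Int.toStr k) else s
          if bVis ((PySem.List.pyGet? l j).getD 0) ((PySem.List.pyGet? (bSuf l).1 j).getD none) then
              PySem.Set.add s1 (PySem.Int.toStr row ++ ":" ++ PySem.Int.toStr j) else s1) s := by
  intro d
  induction d with
  | zero =>
    intro i s h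
    rw [aInner, dif_neg (by omega), PySem.List.pyRange_one_eq_nil (by omega), List.foldl_nil]
  | succ d ih =>
    intro i s h
    have hi : i + 1 < l.length := by omega
    have hjn : ((l.length - 1 - i : Nat) : Int) = (l.length : Int) - 1 - (i : Int) := by omega
    rw [aInner, dif_pos (by constructor <;> omega),
      PySem.List.pyRange_one_cons (by omega), List.foldl_cons]
    simp only
    rw [← condL l i (by omega), ← hjn, ← condR l (l.length - 1 - i) (by omega)]
    have harg : (l.length : Int) - 1 - (i : Int) - 1 = (l.length : Int) - 1 - ((i : Int) + 1) := by ring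
    have hcast : ((i : Int) + 1) = ((i + 1 : Nat) : Int) := by push_cast; ring
    rw [hjn, harg, hcast, ih (i + 1) _ (by omega)]

lemma rowEq (row : Int) (l : List Int) (s : PySem.Set String) :
    aInner row l 0 ((l.length : Int) - 1) s = bRow row l s := by
  have h0 := zig row l (l.length - 1 - 0) 0 s rfl
  simpa [bRow] using h0

lemma outerEq (m : List (List Int)) : ∀ (row : Int) (s : PySem.Set String),
    (m.foldl (fun (st : PySem.Set String × Int) l =>
      (aInner st.2 l 0 ((l.length : Int) - 1) st.1, st.2 + 1)) (s, row)).1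
    = (PySem.List.enumerate m row).foldl (fun (s : PySem.Set String) p => bRow p.1 p.2 s) s := by
  induction m with
  | nil => intro row s; simp [PySem.List.enumerate]
  | cons l ls ih =>
    intro row s
    have he : PySem.List.enumerate (l :: ls) row = (row, l) :: PySem.List.enumerate ls (row + 1) := by
      simp [PySem.List.enumerate]
    rw [List.foldl_cons, he, List.foldl_cons, rowEq]
    exact ih (row + 1) (bRow row l s)

-- ===== VERDICT (by name: the statement is the Claim_ definition above) =====
theorem check_mat_spec : Claim_equal_check_mat := by
  intro m _
  unfold Spec_check_mat check_mat check_mat_alt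
  exact outerEq m 0 PySem.Set.empty
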